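-- pv_equiv track=rewrite | github.com/Sam-Metrologia/sam-2 | core/views/dashboard.py | _process_projected_activities_for_pie
-- ===== SOURCE A (Python) =====
-- def _process_projected_activities_for_pie(projected_activities, prefix):
--     """Procesa actividades proyectadas para gráficos de torta"""
--
--     total_programmed = len(projected_activities)
--     realized = sum(1 for act in projected_activities if act['status'] == 'Realizado')
--     no_cumplido = sum(1 for act in projected_activities if act['status'] == 'No Cumplido')
--     pendiente = sum(1 for act in projected_activities if act['status'] == 'Pendiente/Programado')
--
--     if total_programmed == 0:
--         return {
--             f'{prefix}_total_programmed_anual': 0,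
--             f'{prefix}_realized_anual': 0,
--             f'{prefix}_no_cumplido_anual': 0,
--             f'{prefix}_pendiente_anual': 0,
--             f'{prefix}_realized_anual_percent': 0,
--             f'{prefix}_no_cumplido_anual_percent': 0,
--             f'{prefix}_pendiente_anual_percent': 0,
--         }
--
--     return {
--         f'{prefix}_total_programmed_anual': total_programmed,
--         f'{prefix}_realized_anual': realized,
--         f'{prefix}_no_cumplido_anual': no_cumplido,
--         f'{prefix}_pendiente_anual': pendiente,
--         f'{prefix}_realized_anual_percent': round((realized / total_programmed) * 100),
--         f'{prefix}_no_cumplido_anual_percent': round((no_cumplido / total_programmed) * 100),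
--         f'{prefix}_pendiente_anual_percent': round((pendiente / total_programmed) * 100),
--     }
-- ===== SOURCE B (Python) =====
-- def _process_projected_activities_for_pie(projected_activities, prefix):
--     """One tallying pass + table-driven result: zip suffixes with values instead of two dict literals."""
--     counts = {}
--     for act in projected_activities:
--         s = act['status']
--         counts[s] = counts.get(s, 0) + 1
--     total = len(projected_activities)
--     cats = [counts.get(k, 0) for k in ('Realizado', 'No Cumplido', 'Pendiente/Programado')]
--     percents = [0, 0, 0] if total == 0 else [round(c / total * 100) for c in cats]
--     suffixes = ['_total_programmed_anual', '_realized_anual', '_no_cumplido_anual',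
--                 '_pendiente_anual', '_realized_anual_percent', '_no_cumplido_anual_percent',
--                 '_pendiente_anual_percent']
--     return {prefix + suf: val for suf, val in zip(suffixes, [total] + cats + percents)}
-- ===== Notes on version B (the rewrite author's own statement) =====
-- stated objective: simpler
-- what changed: A's three separate sum-comprehension scans become one dict-tallying pass, and the two seven-entry dict literals (zero case and normal case) are replaced by a single table-driven comprehension zipping the key suffixes with a computed value list.
import Mathlib
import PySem

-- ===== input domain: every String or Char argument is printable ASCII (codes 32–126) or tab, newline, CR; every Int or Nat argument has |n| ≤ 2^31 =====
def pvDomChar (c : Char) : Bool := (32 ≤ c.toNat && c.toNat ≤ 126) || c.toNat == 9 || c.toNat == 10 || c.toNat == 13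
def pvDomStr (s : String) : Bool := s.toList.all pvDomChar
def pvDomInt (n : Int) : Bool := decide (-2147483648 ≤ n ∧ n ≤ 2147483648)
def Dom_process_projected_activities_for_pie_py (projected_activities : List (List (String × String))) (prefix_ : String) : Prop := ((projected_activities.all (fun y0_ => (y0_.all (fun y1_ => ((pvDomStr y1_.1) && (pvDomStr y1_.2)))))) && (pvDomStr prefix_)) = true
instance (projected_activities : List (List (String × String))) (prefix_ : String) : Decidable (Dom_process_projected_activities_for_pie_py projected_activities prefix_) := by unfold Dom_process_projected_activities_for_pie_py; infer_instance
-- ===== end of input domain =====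

-- B replaces A's three sum-comprehension scans by one dict-tallying pass and A's two dict literals by one
-- table-driven zip of key suffixes with a value list (objective: simpler).
-- Shared helper: integer model of Python's round((c / t) * 100), hand-ported; exact for 0 ≤ c ≤ t < 2^53
-- (IEEE-754 double division, then multiplication by 100, then round-half-even to int).
def pvRndE (n d : Nat) : Nat :=
  let q := n / d
  let r := n % d
  if d < 2 * r then q + 1
  else if 2 * r < d then q
  else if q % 2 = 0 then q else q + 1

def pvRoundPct (c t : Int) : Int :=
  let cn := c.toNat
  let tn := t.toNat
  if cn = 0 then 0
  else
    let k0 := 52 + (Nat.log2 tn + 1) - (Nat.log2 cn + 1)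
    let k := if tn * 2 ^ 52 ≤ cn * 2 ^ k0 then k0 else k0 + 1
    let m := pvRndE (cn * 2 ^ k) tn
    let p := 100 * m
    let L := Nat.log2 p + 1
    let p' := if 53 < L then pvRndE p (2 ^ (L - 53)) * 2 ^ (L - 53) else p
    (pvRndE p' (2 ^ k) : Int)

-- ===== PORT A =====
def process_projected_activities_for_pie_py (projected_activities : List (List (String × String))) (prefix_ : String) : List (String × Int) :=
  let total_programmed : Int := projected_activities.length
  let realized : Int := (projected_activities.map (fun act => if (PySem.Dict.mk act).get? "status" == some "Realizado" then (1 : Int) else 0)).sum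
  let no_cumplido : Int := (projected_activities.map (fun act => if (PySem.Dict.mk act).get? "status" == some "No Cumplido" then (1 : Int) else 0)).sum
  let pendiente : Int := (projected_activities.map (fun act => if (PySem.Dict.mk act).get? "status" == some "Pendiente/Programado" then (1 : Int) else 0)).sum
  if total_programmed = 0 then
    [(prefix_ ++ "_total_programmed_anual", 0),
     (prefix_ ++ "_realized_anual", 0),
     (prefix_ ++ "_no_cumplido_anual", 0),
     (prefix_ ++ "_pendiente_anual", 0),
     (prefix_ ++ "_realized_anual_percent", 0),
     (prefix_ ++ "_no_cumplido_anual_percent", 0),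
     (prefix_ ++ "_pendiente_anual_percent", 0)]
  else
    [(prefix_ ++ "_total_programmed_anual", total_programmed),
     (prefix_ ++ "_realized_anual", realized),
     (prefix_ ++ "_no_cumplido_anual", no_cumplido),
     (prefix_ ++ "_pendiente_anual", pendiente),
     (prefix_ ++ "_realized_anual_percent", pvRoundPct realized total_programmed),
     (prefix_ ++ "_no_cumplido_anual_percent", pvRoundPct no_cumplido total_programmed),
     (prefix_ ++ "_pendiente_anual_percent", pvRoundPct pendiente total_programmed)]

-- ===== PORT B =====
def process_projected_activities_for_pie_py_alt (projected_activities : List (List (String × String))) (prefix_ : String) : List (String × Int) :=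
  let counts : PySem.Dict String Int :=
    projected_activities.foldl
      (fun d act =>
        let s := ((PySem.Dict.mk act).get? "status").getD ""
        d.insert s (d.getD s 0 + 1))
      PySem.Dict.empty
  let total : Int := projected_activities.length
  let cats : List Int := ["Realizado", "No Cumplido", "Pendiente/Programado"].map (fun k => counts.getD k 0)
  let percents : List Int := if total = 0 then [0, 0, 0] else cats.map (fun c => pvRoundPct c total)
  let suffixes : List String :=
    ["_total_programmed_anual", "_realized_anual", "_no_cumplido_anual", "_pendiente_anual",
     "_realized_anual_percent", "_no_cumplido_anual_percent", "_pendiente_anual_percent"]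
  (suffixes.zip (total :: cats ++ percents)).map (fun p => (prefix_ ++ p.1, p.2))

-- ===== PRECONDITION & SPEC =====
-- Pre_ excludes exactly the activities missing a 'status' key, on which Python A raises KeyError (B raises there too).
def Pre_process_projected_activities_for_pie_py (projected_activities : List (List (String × String))) (prefix_ : String) : Prop :=
  projected_activities.all (fun act => act.any (fun p => p.1 == "status")) = true
instance (projected_activities : List (List (String × String))) (prefix_ : String) : Decidable (Pre_process_projected_activities_for_pie_py projected_activities prefix_) := by unfold Pre_process_projected_activities_for_pie_py; infer_instance

def pvWitness_process_projected_activities_for_pie_py : (List (List (String × String))) × String :=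
  ([[("status", "Realizado")], [("status", "Pendiente/Programado")]], "eq")

def Spec_process_projected_activities_for_pie_py (projected_activities : List (List (String × String))) (prefix_ : String) (out : List (String × Int)) : Prop := out = process_projected_activities_for_pie_py_alt projected_activities prefix_
instance (projected_activities : List (List (String × String))) (prefix_ : String) (out : List (String × Int)) : Decidable (Spec_process_projected_activities_for_pie_py projected_activities prefix_ out) := by unfold Spec_process_projected_activities_for_pie_py; infer_instance

-- ===== CLAIM (what is proved, stated in full; the proofs are below) =====
def Claim_equal_process_projected_activities_for_pie_py : Prop := ∀ (projected_activities : List (List (String × String))) (prefix_ : String), Dom_process_projected_activities_for_pie_py projected_activities prefix_ → Pre_process_projected_activities_for_pie_py projected_activities prefix_ → Spec_process_projected_activities_for_pie_py projected_activities prefix_ (process_projected_activities_for_pie_py projected_activities prefix_)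

-- ===== LEMMAS AND PROOFS =====

-- the count of status v in the extracted-statuses list is A's 0/1 sum for v (v nonempty)
lemma pv_count_aux (pa : List (List (String × String))) (v : String) (hv : ("" == v) = false) :
    ((pa.map (fun act => ((PySem.Dict.mk act).get? "status").getD "")).count v : Int)
    = (pa.map (fun act => if (PySem.Dict.mk act).get? "status" == some v then (1 : Int) else 0)).sum := by
  induction pa with
  | nil => simp
  | cons a rest ih =>
    simp only [List.map_cons, List.count_cons, List.sum_cons]
    push_cast
    rw [ih]
    have hx : (if ((((PySem.Dict.mk a).get? "status").getD "" == v) = true) then (1 : Int) else 0)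
        = (if (((PySem.Dict.mk a).get? "status" == some v) = true) then (1 : Int) else 0) := by
      rcases hg : (PySem.Dict.mk a).get? "status" with _ | s
      · simp [hv]
      · by_cases hsv : s = v <;> simp [hsv]
    rw [hx]
    ring

-- B's dict tally, read at a nonempty status v, is A's 0/1 sum for v.
lemma pv_count_eq (pa : List (List (String × String))) (v : String) (hv : ("" == v) = false) :
    (pa.foldl
      (fun d act =>
        let s := ((PySem.Dict.mk act).get? "status").getD ""
        d.insert s (d.getD s 0 + 1))
      (PySem.Dict.empty : PySem.Dict String Int)).getD v 0
    = (pa.map (fun act => if (PySem.Dict.mk act).get? "status" == some v then (1 : Int) else 0)).sum := by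
  have h := PySem.Dict.getD_foldl_insert_add_one
      (l := pa.map (fun act => ((PySem.Dict.mk act).get? "status").getD ""))
      (d := (PySem.Dict.empty : PySem.Dict String Int)) (v := v)
  rw [List.foldl_map] at h
  rw [show (PySem.Dict.empty : PySem.Dict String Int).getD v 0 = 0 from rfl, zero_add] at h
  rw [h, pv_count_aux pa v hv]

-- ===== VERDICT (by name: the statement is the Claim_ definition above) =====
theorem process_projected_activities_for_pie_py_spec : Claim_equal_process_projected_activities_for_pie_py := by
  intro pa prefix_ _ _
  show process_projected_activities_for_pie_py pa prefix_ = process_projected_activities_for_pie_py_alt pa prefix_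
  rcases pa with _ | ⟨a, rest⟩
  · rfl
  · unfold process_projected_activities_for_pie_py process_projected_activities_for_pie_py_alt
    simp only [List.map_cons, List.length_cons]
    rw [pv_count_eq (a :: rest) "Realizado" (by decide),
        pv_count_eq (a :: rest) "No Cumplido" (by decide),
        pv_count_eq (a :: rest) "Pendiente/Programado" (by decide)]
    have hne : ((rest.length + 1 : Nat) : Int) ≠ 0 := by exact_mod_cast (Nat.succ_ne_zero rest.length)
    simp only [hne, if_false, List.map_cons, List.map_nil,
      List.cons_append, List.nil_append, List.zip_cons_cons, List.zip_nil_right]
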